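-- pv_equiv track=rewrite | github.com/ful1e5/clickgen | clickgen/builders/windows.py | frames_have_animation
-- ===== SOURCE A (Python) =====
-- from typing import Any, List, Literal, NamedTuple, Optional, Tuple
--
-- def frames_have_animation(frames: List[Tuple[int, int, int, str, int]]) -> bool:
--     sizes = set()
--     for frame in frames:
--         if frame[4] == 0:
--             continue
--         if frame[0] in sizes:
--             return True
--         sizes.add(frame[0])
--
--     return False
-- ===== SOURCE B (Python) =====
-- def frames_have_animation(frames):
--     sizes = sorted(f[0] for f in frames if f[4] != 0)
--     return any(a == b for a, b in zip(sizes, sizes[1:]))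
-- ===== Notes on version B (the rewrite author's own statement) =====
-- stated objective: alternative
-- what changed: Replaces A's seen-set with early exit by a sort-then-adjacent-scan: sort the sizes of nonzero-delay frames and report whether any two neighbours are equal (no set at all).
import Mathlib
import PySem

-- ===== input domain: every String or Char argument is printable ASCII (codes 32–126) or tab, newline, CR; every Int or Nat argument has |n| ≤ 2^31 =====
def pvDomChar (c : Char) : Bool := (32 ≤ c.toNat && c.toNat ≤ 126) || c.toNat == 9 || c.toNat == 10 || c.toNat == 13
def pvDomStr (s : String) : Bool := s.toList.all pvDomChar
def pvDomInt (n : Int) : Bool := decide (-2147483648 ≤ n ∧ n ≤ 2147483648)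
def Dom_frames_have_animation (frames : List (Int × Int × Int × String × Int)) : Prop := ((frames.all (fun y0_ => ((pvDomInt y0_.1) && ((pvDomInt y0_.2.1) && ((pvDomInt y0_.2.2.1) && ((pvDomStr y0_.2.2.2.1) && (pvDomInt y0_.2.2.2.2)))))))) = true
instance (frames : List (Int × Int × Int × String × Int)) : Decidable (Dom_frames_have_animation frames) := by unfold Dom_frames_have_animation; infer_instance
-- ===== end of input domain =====

-- B replaces A's seen-set-with-early-exit by sort-then-adjacent-scan: sort the sizes of
-- nonzero-delay frames and report whether any two neighbours are equal (no set at all).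

-- ===== PORT A =====
-- A's loop: carries the growing set 'sizes', returns True at the first repeated size.
def framesLoopA (fs : List (Int × Int × Int × String × Int)) (sizes : PySem.Set Int) : Bool :=
  match fs with
  | [] => false
  | f :: rest =>
    if f.2.2.2.2 == 0 then framesLoopA rest sizes
    else if PySem.Set.contains sizes f.1 then true
    else framesLoopA rest (PySem.Set.add sizes f.1)

def frames_have_animation (frames : List (Int × Int × Int × String × Int)) : Bool :=
  framesLoopA frames PySem.Set.empty

-- ===== PORT B =====
-- any(a == b for a, b in zip(sizes, sizes[1:])) : adjacent-pair scan
def hasAdjDup : List Int → Bool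
  | a :: b :: t => a == b || hasAdjDup (b :: t)
  | _ => false

def frames_have_animation_alt (frames : List (Int × Int × Int × String × Int)) : Bool :=
  let sizes := PySem.List.sorted ((frames.filter (fun f => f.2.2.2.2 != 0)).map (fun f => f.1)) (fun x => x) false
  hasAdjDup sizes

-- ===== PRECONDITION & SPEC =====
def Spec_frames_have_animation (frames : List (Int × Int × Int × String × Int)) (out : Bool) : Prop := out = frames_have_animation_alt frames
instance (frames : List (Int × Int × Int × String × Int)) (out : Bool) : Decidable (Spec_frames_have_animation frames out) := by unfold Spec_frames_have_animation; infer_instance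

-- ===== CLAIM =====
def Claim_equal_frames_have_animation : Prop := ∀ (frames : List (Int × Int × Int × String × Int)), Dom_frames_have_animation frames → Spec_frames_have_animation frames (frames_have_animation frames)

-- ===== LEMMAS AND PROOFS =====
-- the sizes both versions are about
def sizesOf (fs : List (Int × Int × Int × String × Int)) : List Int :=
  (fs.filter (fun f => f.2.2.2.2 != 0)).map (fun f => f.1)

-- A's loop from accumulator s returns true iff s ++ remaining sizes contains a repeat
theorem framesLoopA_iff (fs : List (Int × Int × Int × String × Int)) :
    ∀ s : PySem.Set Int, s.Nodup → (framesLoopA fs s = true ↔ ¬ (s ++ sizesOf fs).Nodup) := by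
  induction fs with
  | nil => intro s hs; simp [framesLoopA, sizesOf, hs]
  | cons f fs ih =>
    intro s hs
    by_cases h0 : f.2.2.2.2 = 0
    · simp only [framesLoopA, sizesOf, h0, BEq.rfl, if_true, List.filter_cons, bne_self_eq_false,
        Bool.false_eq_true, if_false]
      exact ih s hs
    · have hne : (f.2.2.2.2 == 0) = false := by simp [h0]
      simp only [framesLoopA, sizesOf, hne, Bool.false_eq_true, if_false, List.filter_cons,
        bne_iff_ne, ne_eq, h0, not_false_iff, if_true, List.map_cons]
      by_cases hmem : f.1 ∈ s
      · have hc : PySem.Set.contains s f.1 = true := (PySem.Set.contains_iff s f.1).mpr hmem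
        simp only [hc, if_true, true_iff]
        intro hnd
        exact (List.disjoint_of_nodup_append hnd) hmem (List.mem_cons_self ..)
      · have hc : PySem.Set.contains s f.1 = false := by
          simpa using (fun h => hmem ((PySem.Set.contains_iff s f.1).mp h))
        have hadd : PySem.Set.add s f.1 = s ++ [f.1] := PySem.Set.add_of_not_mem hmem
        have hnd : (PySem.Set.add s f.1).Nodup := PySem.Set.nodup_add s f.1 hs
        simp only [hc, Bool.false_eq_true, if_false]
        rw [ih _ hnd, hadd, List.append_assoc, List.singleton_append]
        exact Iff.rfl

-- on a (≤)-sorted list, an adjacent duplicate exists iff the list has duplicates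
theorem hasAdjDup_iff (xs : List Int) (h : xs.Pairwise (· ≤ ·)) :
    hasAdjDup xs = true ↔ ¬ xs.Nodup := by
  induction xs with
  | nil => simp [hasAdjDup]
  | cons a t ih =>
    cases t with
    | nil => simp [hasAdjDup]
    | cons b u =>
      have hab : a ≤ b := (List.pairwise_cons.mp h).1 b (List.mem_cons_self ..)
      have htail : (b :: u).Pairwise (· ≤ ·) := (List.pairwise_cons.mp h).2
      by_cases heq : a = b
      · subst heq
        simp [hasAdjDup, List.nodup_cons]
      · have hlt : a < b := lt_of_le_of_ne hab heq
        have hnot : a ∉ b :: u := by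
          intro hm
          rcases List.mem_cons.mp hm with h1 | h2
          · exact heq h1
          · have : b ≤ a := (List.pairwise_cons.mp htail).1 a h2
            exact absurd hlt (not_lt.mpr this)
        have hih := ih htail
        have hb : (a == b) = false := by simp [heq]
        simp only [hasAdjDup, hb, Bool.false_or]
        rw [hih]
        simp [List.nodup_cons, hnot]

-- ===== VERDICT =====
theorem frames_have_animation_spec : Claim_equal_frames_have_animation := by
  intro frames _
  unfold Spec_frames_have_animation frames_have_animation frames_have_animation_alt
  have hA := framesLoopA_iff frames PySem.Set.empty (by simp [PySem.Set.empty])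
  simp only [PySem.Set.empty, List.nil_append] at hA
  have hperm : (PySem.List.sorted (sizesOf frames) (fun x => x) false).Perm (sizesOf frames) :=
    PySem.List.sorted_perm ..
  have hpw : (PySem.List.sorted (sizesOf frames) (fun x => x) false).Pairwise (· ≤ ·) := by
    simpa using PySem.List.sorted_pairwise (xs := sizesOf frames) (key := fun x => x)
  have hB := hasAdjDup_iff _ hpw
  rw [hperm.nodup_iff] at hB
  rw [show ((frames.filter (fun f => f.2.2.2.2 != 0)).map (fun f => f.1)) = sizesOf frames from rfl]
  show framesLoopA frames PySem.Set.empty = hasAdjDup (PySem.List.sorted (sizesOf frames) (fun x => x) false)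
  cases hAv : framesLoopA frames PySem.Set.empty with
  | true => exact (hB.mpr (hA.mp hAv)).symm
  | false =>
    have : ¬ hasAdjDup (PySem.List.sorted (sizesOf frames) (fun x => x) false) = true := by
      intro hb
      have hAv' : framesLoopA frames [] = false := by
        rw [show ([] : List Int) = PySem.Set.empty from rfl]; exact hAv
      exact absurd (hA.mpr (hB.mp hb)) (by simp [hAv'])
    simp [Bool.not_eq_true] at this
    exact this.symm
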